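-- pv_equiv track=rewrite | github.com/elikrok/cmmc_tool | scanner/config_checker.py | _vty_management_controls
-- ===== SOURCE A (Python) =====
-- def _vty_management_controls(lines):
--     in_vty = False
--     ssh_only = False
--     access_class = False
--     for raw in lines:
--         low = raw.strip().lower()
--         if low.startswith('line vty'):
--             in_vty = True
--             continue
--         if in_vty and low.startswith(('line ', 'interface ', 'router ', 'hostname', 'aaa ', 'ip ')):
--             in_vty = False
--         if in_vty:
--             if 'transport input ssh' in low and 'telnet' not in low:
--                 ssh_only = True
--             if 'transport input telnet' in low:
--                 ssh_only = False
--             if low.startswith('access-class ') and (' in' in low or ' out' in low):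
--                 access_class = True
--     return {'ssh_only': ssh_only, 'vty_access_class': access_class}
-- ===== SOURCE B (Python) =====
-- def _boundary(low):
--     return low.startswith(('line ', 'interface ', 'router ', 'hostname', 'aaa ', 'ip '))
--
-- def _acl_rule(low):
--     return low.startswith('access-class ') and (' in' in low or ' out' in low)
--
-- def _vty_management_controls(lines):
--     # pass 1: collect the normalized lines belonging to VTY sections
--     body = []
--     in_vty = False
--     for raw in lines:
--         low = raw.strip().lower()
--         if low.startswith('line vty'):
--             in_vty = True
--         elif in_vty and _boundary(low):
--             in_vty = False
--         elif in_vty: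
--             body.append(low)
--     # ssh_only is decided by the LAST deciding line: scan backwards, stop at the
--     # first telnet directive (-> False) or ssh-without-telnet directive (-> True)
--     ssh_only = False
--     for low in reversed(body):
--         if 'transport input telnet' in low:
--             break
--         if 'transport input ssh' in low and 'telnet' not in low:
--             ssh_only = True
--             break
--     access_class = any(_acl_rule(low) for low in body)
--     return {'ssh_only': ssh_only, 'vty_access_class': access_class}
-- ===== Notes on version B (the rewrite author's own statement) =====
-- stated objective: alternative
-- what changed: Replaces A's single stateful loop (three flags updated per line) by: collect the VTY-section lines once, then decide ssh_only by a backwards early-exit scan for the last deciding transport directive and the access-class flag by an existence test over the collected lines.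
import Mathlib
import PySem

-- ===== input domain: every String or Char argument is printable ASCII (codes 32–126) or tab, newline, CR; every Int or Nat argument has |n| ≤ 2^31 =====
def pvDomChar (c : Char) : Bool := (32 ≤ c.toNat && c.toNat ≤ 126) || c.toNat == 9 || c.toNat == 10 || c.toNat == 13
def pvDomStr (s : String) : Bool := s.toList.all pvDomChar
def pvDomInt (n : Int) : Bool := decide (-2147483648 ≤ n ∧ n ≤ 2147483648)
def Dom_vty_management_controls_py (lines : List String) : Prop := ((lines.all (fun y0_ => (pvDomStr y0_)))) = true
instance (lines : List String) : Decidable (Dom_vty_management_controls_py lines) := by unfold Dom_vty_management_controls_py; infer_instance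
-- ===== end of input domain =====

-- B replaces A's single stateful loop by: collect the VTY-section lines, then decide
-- ssh_only by a backwards scan for the last deciding directive and the access-class
-- flag by an existence test; same result, proved equal (objective: alternative).

-- ===== PORT A =====
def pvStepA (st : Bool × Bool × Bool) (raw : String) : Bool × Bool × Bool :=
  let low := PySem.Str.lower (PySem.Str.strip raw)
  if PySem.Str.startswith low "line vty" then (true, st.2.1, st.2.2)
  else
    let in_vty :=
      if st.1 && (PySem.Str.startswith low "line " || PySem.Str.startswith low "interface " ||
          PySem.Str.startswith low "router " || PySem.Str.startswith low "hostname" ||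
          PySem.Str.startswith low "aaa " || PySem.Str.startswith low "ip ") then false else st.1
    if in_vty then
      let ssh_only := if PySem.Str.isIn "transport input ssh" low && !PySem.Str.isIn "telnet" low then true else st.2.1
      let ssh_only := if PySem.Str.isIn "transport input telnet" low then false else ssh_only
      let access_class := if PySem.Str.startswith low "access-class " && (PySem.Str.isIn " in" low || PySem.Str.isIn " out" low) then true else st.2.2
      (in_vty, ssh_only, access_class)
    else (in_vty, st.2.1, st.2.2)

def vty_management_controls_py (lines : List String) : List (String × Bool) :=
  let st := lines.foldl pvStepA (false, false, false)
  [("ssh_only", st.2.1), ("vty_access_class", st.2.2)]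

-- ===== PORT B =====
-- Python helper _boundary
def pvBoundary (low : String) : Bool :=
  PySem.Str.startswith low "line " || PySem.Str.startswith low "interface " ||
  PySem.Str.startswith low "router " || PySem.Str.startswith low "hostname" ||
  PySem.Str.startswith low "aaa " || PySem.Str.startswith low "ip "

-- Python helper _acl_rule
def pvAclRule (low : String) : Bool :=
  PySem.Str.startswith low "access-class " && (PySem.Str.isIn " in" low || PySem.Str.isIn " out" low)

-- pass 1: collect normalized in-section lines (B's for-loop over (body, in_vty))
def pvCollectStep (st : List String × Bool) (raw : String) : List String × Bool :=
  let low := PySem.Str.lower (PySem.Str.strip raw)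
  if PySem.Str.startswith low "line vty" then (st.1, true)
  else if st.2 && pvBoundary low then (st.1, false)
  else if st.2 then (st.1 ++ [low], st.2)
  else st

-- B's backwards scan with early break: first deciding directive wins
def pvSshScan : List String → Bool
  | [] => false
  | low :: rest =>
      if PySem.Str.isIn "transport input telnet" low then false
      else if PySem.Str.isIn "transport input ssh" low && !PySem.Str.isIn "telnet" low then true
      else pvSshScan rest

def vty_management_controls_py_alt (lines : List String) : List (String × Bool) :=
  let body := (lines.foldl pvCollectStep ([], false)).1
  let ssh_only := pvSshScan body.reverse
  let access_class := body.any pvAclRule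
  [("ssh_only", ssh_only), ("vty_access_class", access_class)]

-- ===== PRECONDITION & SPEC =====
def Spec_vty_management_controls_py (lines : List String) (out : List (String × Bool)) : Prop := out = vty_management_controls_py_alt lines
instance (lines : List String) (out : List (String × Bool)) : Decidable (Spec_vty_management_controls_py lines out) := by unfold Spec_vty_management_controls_py; infer_instance

-- ===== CLAIM (what is proved, stated in full; the proofs are below) =====
def Claim_equal_vty_management_controls_py : Prop := ∀ (lines : List String), Dom_vty_management_controls_py lines → Spec_vty_management_controls_py lines (vty_management_controls_py lines)

-- ===== LEMMAS AND PROOFS =====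

-- proof-only: A's two rule updates on one in-section line, as a fold step
def pvRules (st : Bool × Bool) (low : String) : Bool × Bool :=
  let ssh_only := if PySem.Str.isIn "transport input ssh" low && !PySem.Str.isIn "telnet" low then true else st.1
  let ssh_only := if PySem.Str.isIn "transport input telnet" low then false else ssh_only
  let access_class := if pvAclRule low then true else st.2
  (ssh_only, access_class)

-- proof-only: the backwards scan with an explicit default for "no deciding line"
def pvSshD : List String → Bool → Bool
  | [], s => s
  | low :: rest, s =>
      if PySem.Str.isIn "transport input telnet" low then false
      else if PySem.Str.isIn "transport input ssh" low && !PySem.Str.isIn "telnet" low then true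
      else pvSshD rest s

lemma pvSshD_append (l1 l2 : List String) (s : Bool) :
    pvSshD (l1 ++ l2) s = pvSshD l1 (pvSshD l2 s) := by
  induction l1 with
  | nil => rfl
  | cons x xs ih => simp only [List.cons_append, pvSshD]; split_ifs <;> simp [ih]

lemma pvSshD_false (l : List String) : pvSshD l false = pvSshScan l := by
  induction l with
  | nil => rfl
  | cons x xs ih => simp only [pvSshD, pvSshScan]; split_ifs <;> simp [ih]

-- the collector accumulates by appending
lemma pvCollect_acc (lines : List String) (acc : List String) (iv : Bool) :
    (lines.foldl pvCollectStep (acc, iv)).1 = acc ++ (lines.foldl pvCollectStep ([], iv)).1 := by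
  induction lines generalizing acc iv with
  | nil => simp
  | cons raw rest ih =>
    simp only [List.foldl_cons, pvCollectStep]
    cases PySem.Str.startswith (PySem.Str.lower (PySem.Str.strip raw)) "line vty"
    · cases iv
      · simp
        exact ih acc false
      · cases pvBoundary (PySem.Str.lower (PySem.Str.strip raw))
        · simp
          rw [ih (acc ++ [PySem.Str.lower (PySem.Str.strip raw)]) true,
              ih [PySem.Str.lower (PySem.Str.strip raw)] true, List.append_assoc]
        · simp
          exact ih acc false
    · simp
      exact ih acc true

-- main invariant: A's fold state (ssh, ac) equals folding pvRules over the collected lines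
lemma pvMain (lines : List String) (iv s a : Bool) :
    (lines.foldl pvStepA (iv, s, a)).2 =
      (lines.foldl pvCollectStep ([], iv)).1.foldl pvRules (s, a) := by
  induction lines generalizing iv s a with
  | nil => simp
  | cons raw rest ih =>
    simp only [List.foldl_cons, pvStepA, pvCollectStep, pvBoundary]
    cases PySem.Str.startswith (PySem.Str.lower (PySem.Str.strip raw)) "line vty"
    · cases iv
      · simp
        exact ih false s a
      · cases h : (PySem.Str.startswith (PySem.Str.lower (PySem.Str.strip raw)) "line " ||
            PySem.Str.startswith (PySem.Str.lower (PySem.Str.strip raw)) "interface " ||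
            PySem.Str.startswith (PySem.Str.lower (PySem.Str.strip raw)) "router " ||
            PySem.Str.startswith (PySem.Str.lower (PySem.Str.strip raw)) "hostname" ||
            PySem.Str.startswith (PySem.Str.lower (PySem.Str.strip raw)) "aaa " ||
            PySem.Str.startswith (PySem.Str.lower (PySem.Str.strip raw)) "ip ")
        · simp [pvCollect_acc rest [PySem.Str.lower (PySem.Str.strip raw)] true, pvRules, pvAclRule, ih]
        · simp
          exact ih false s a
    · simp
      exact ih true s a

-- folding pvRules = (backwards scan with default, existence of an access-class line)
lemma pvRulesFold (c : List String) (s a : Bool) :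
    c.foldl pvRules (s, a) = (pvSshD c.reverse s, a || c.any pvAclRule) := by
  induction c generalizing s a with
  | nil => simp [pvSshD]
  | cons low rest ih =>
    simp only [List.foldl_cons, List.reverse_cons, List.any_cons, ih, pvSshD_append, pvRules]
    refine Prod.ext ?_ ?_
    · simp only [pvSshD]
    · simp only []
      cases a <;> cases pvAclRule low <;> simp

theorem pvFinal (lines : List String) :
    vty_management_controls_py lines = vty_management_controls_py_alt lines := by
  simp [vty_management_controls_py, vty_management_controls_py_alt, pvMain, pvRulesFold,
    pvSshD_false]

-- ===== VERDICT (by name: the statement is the Claim_ definition above) =====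
theorem vty_management_controls_py_spec : Claim_equal_vty_management_controls_py := by
  intro lines _
  unfold Spec_vty_management_controls_py
  exact (pvFinal lines)
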